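-- pv_equiv track=rewrite | github.com/bsoist/codesignal-arcade-solutions | 0_intro/012_sort_by_height.py | solution
-- ===== SOURCE A (Python) =====
-- def solution(a):
--     i = 0
--     sorted_heights = []
--     for height in sorted(a):
--         if height != -1:
--             while a[i] == -1:
--                 i += 1
--             a[i] = height
--             i += 1
--     return a
-- ===== SOURCE B (Python) =====
-- def solution(a):
--     pool = [v for v in a if v != -1]
--     for i in range(len(a)):
--         if a[i] != -1:
--             m = min(pool)
--             pool.remove(m)
--             a[i] = m
--     return a
-- ===== Notes on version B (the rewrite author's own statement) =====
-- stated objective: alternative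
-- what changed: B never sorts: it keeps a multiset pool of the real heights and, at each non-(-1) position in a single forward pass, extracts the minimum from the pool (selection) and places it, instead of A's library sort of the whole array followed by a skip-(-1) placement loop.
import Mathlib
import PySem

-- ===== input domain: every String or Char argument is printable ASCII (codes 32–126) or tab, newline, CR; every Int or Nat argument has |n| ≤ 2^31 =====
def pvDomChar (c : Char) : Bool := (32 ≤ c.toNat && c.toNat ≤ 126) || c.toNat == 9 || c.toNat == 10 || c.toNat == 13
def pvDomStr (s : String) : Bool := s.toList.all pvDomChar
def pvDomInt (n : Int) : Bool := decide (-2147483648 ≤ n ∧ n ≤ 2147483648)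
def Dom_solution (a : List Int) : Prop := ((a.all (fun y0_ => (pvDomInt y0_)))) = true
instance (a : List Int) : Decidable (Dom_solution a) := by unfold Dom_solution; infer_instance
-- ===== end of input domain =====

-- B never sorts: it selects (repeated min-extraction from the pool of real heights) into the
-- non-(-1) slots in one forward pass, instead of A's whole-array sort with a skip-(-1) loop;
-- return-value equivalence (both Pythons mutate `a` in place identically and return it).

-- ===== PORT A =====
-- the inner 'while a[i] == -1: i += 1' (reads the current, partially-mutated list)
def pySkip (a : List Int) (i : Nat) : Nat :=
  if h : i < a.length then
    if a[i] = -1 then pySkip a (i + 1) else i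
  else i
termination_by a.length - i

-- one iteration of A's for-loop body; state = (i, current list)
def pyStep (s : Nat × List Int) (height : Int) : Nat × List Int :=
  if height ≠ -1 then
    let i := pySkip s.2 s.1
    (i + 1, s.2.set i height)
  else s

-- (A's local `sorted_heights = []` is never used and is dropped)
def solution (a : List Int) : List Int :=
  ((PySem.List.sorted a (fun x => x) false).foldl pyStep (0, a)).2

-- ===== PORT B =====
-- B's forward pass over the positions with the pool of real heights: at each non-(-1) slot,
-- take min(pool), remove that first occurrence, place it (the none branches are unreachable:
-- the pool holds exactly one entry per remaining non-(-1) slot, so min/remove never fail)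
def fillPool : List Int → List Int → List Int
  | [], _ => []
  | x :: xs, pool =>
    if x ≠ -1 then
      match PySem.List.min? pool (fun y => y) with
      | some m =>
        match PySem.List.remove? pool m with
        | some rest => m :: fillPool xs rest
        | none => m :: fillPool xs pool
      | none => x :: fillPool xs pool
    else x :: fillPool xs pool

def solution_alt (a : List Int) : List Int :=
  fillPool a (a.filter (fun v => v ≠ -1))

-- ===== PRECONDITION & SPEC =====
def Spec_solution (a : List Int) (out : List Int) : Prop := out = solution_alt a
instance (a : List Int) (out : List Int) : Decidable (Spec_solution a out) := by unfold Spec_solution; infer_instance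

-- ===== CLAIM (what is proved, stated in full; the proofs are below) =====
def Claim_equal_solution : Prop := ∀ (a : List Int), Dom_solution a → Spec_solution a (solution a)

-- ===== LEMMAS AND PROOFS =====

-- proof-side characterisation of B's loop: filling the slots from an already-sorted value list
def fillSorted : List Int → List Int → List Int
  | [], _ => []
  | x :: xs, vs =>
    if x ≠ -1 then
      match vs with
      | v :: rest => v :: fillSorted xs rest
      | [] => x :: fillSorted xs []
    else x :: fillSorted xs vs

-- repeated min-extraction from a pool visits the pool's values in sorted order
theorem fillPool_eq_fillSorted (cur : List Int) : ∀ (pool : List Int),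
    fillPool cur pool = fillSorted cur (PySem.List.sorted pool (fun x => x) false) := by
  induction cur with
  | nil => intro pool; rfl
  | cons x xs ih =>
    intro pool
    by_cases hx : x = -1
    · simp [fillPool, fillSorted, hx, ih]
    · rcases hs : PySem.List.sorted pool (fun x => x) false with _ | ⟨m, t⟩
      · have hpool : pool = [] := (PySem.List.sorted_eq_nil_iff pool (fun x => x) false).mp hs
        subst hpool
        have hmin : PySem.List.min? ([] : List Int) (fun y => y) = none :=
          (PySem.List.min?_eq_none_iff ([] : List Int) (fun y => y)).mpr rfl
        simp [fillPool, fillSorted, hx, hmin, ih, hs]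
      · -- head of the sorted list is the first minimum, which min? returns
        have hmem : m ∈ pool := by
          have : m ∈ PySem.List.sorted pool (fun x => x) false := by simp [hs]
          exact (PySem.List.mem_sorted pool (fun x => x) false m).mp this
        obtain ⟨m', hm'⟩ : ∃ m', PySem.List.min? pool (fun y => y) = some m' := by
          cases h : PySem.List.min? pool (fun y => y) with
          | none =>
            have hp : pool = [] := (PySem.List.min?_eq_none_iff pool (fun y => y)).mp h
            have h0 : PySem.List.sorted ([] : List Int) (fun x => x) false = [] :=
              (PySem.List.sorted_eq_nil_iff ([] : List Int) (fun x => x) false).mpr rfl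
            rw [hp, h0] at hs
            cases hs
          | some v => exact ⟨v, rfl⟩
        have hm'mem : m' ∈ pool := PySem.List.min?_mem hm'
        have hm'min : ∀ y ∈ pool, m' ≤ y := by
          have := PySem.List.min?_isMin hm'
          simpa using this
        have hmmin : ∀ y ∈ pool, m ≤ y := by
          intro y hy
          exact PySem.List.key_head_sorted_le pool (fun x : Int => x) hs y hy
        have hmm : m' = m := le_antisymm (hm'min m hmem) (hmmin m' hm'mem)
        subst hmm
        have hrem : PySem.List.remove? pool m' = some (pool.erase m') :=
          PySem.List.remove?_eq_some_erase pool m' hm'mem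
        -- the remaining pool sorts to the tail t
        have hperm : (m' :: t).Perm pool := by
          have := PySem.List.sorted_perm pool (fun x => x) false
          rwa [hs] at this
        have htperm : t.Perm (pool.erase m') := by
          have := hperm.erase m'
          simpa using this
        have htpw : t.Pairwise (fun a b : Int => a ≤ b) := by
          have hpw := PySem.List.sorted_pairwise pool (fun x : Int => x)
          rw [hs] at hpw
          exact (List.pairwise_cons.mp hpw).2
        have htail : PySem.List.sorted (pool.erase m') (fun x => x) false = t :=
          PySem.List.sorted_id_eq_of_perm_of_pairwise _ _ htperm htpw
        simp [fillPool, fillSorted, hx, hm', hrem, ih, htail]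

theorem fillSorted_nil_vals (cur : List Int) : fillSorted cur [] = cur := by
  induction cur with
  | nil => rfl
  | cons x c ih => simp [fillSorted, ih]

-- A's guard makes -1 heights inert: folding over l is folding over its non-(-1) part
theorem foldl_pyStep_filter (l : List Int) (s : Nat × List Int) :
    l.foldl pyStep s = (l.filter (fun h => h ≠ -1)).foldl pyStep s := by
  induction l generalizing s with
  | nil => rfl
  | cons h t ih =>
    by_cases hh : h = -1
    · subst hh
      have hps : pyStep s (-1) = s := by simp [pyStep]
      simp only [List.foldl_cons, hps, List.filter_cons]
      simpa using ih s
    · simp [hh, ih]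

-- filtering -1 out of sorted(a) = sorting the filtered list
theorem filter_sorted (a : List Int) :
    (PySem.List.sorted a (fun x => x) false).filter (fun v => v ≠ -1)
      = PySem.List.sorted (a.filter (fun v => v ≠ -1)) (fun x => x) false := by
  have hperm : ((PySem.List.sorted a (fun x => x) false).filter (fun v => v ≠ -1)).Perm
      (a.filter (fun v => v ≠ -1)) := (PySem.List.sorted_perm a (fun x => x) false).filter _
  have hpw : ((PySem.List.sorted a (fun x => x) false).filter (fun v => v ≠ -1)).Pairwise (· ≤ ·) := by
    have := (PySem.List.sorted_pairwise a (fun x => x)).filter (fun v => decide (v ≠ -1))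
    simpa using this
  exact Eq.symm (PySem.List.sorted_id_eq_of_perm_of_pairwise _ _ hperm hpw)

theorem skip_cons_neg (pre c : List Int) :
    pySkip (pre ++ (-1 : Int) :: c) pre.length = pySkip (pre ++ (-1 : Int) :: c) (pre.length + 1) := by
  rw [pySkip]
  have hlt : pre.length < (pre ++ (-1 : Int) :: c).length := by simp
  have hget : (pre ++ (-1 : Int) :: c)[pre.length]'hlt = -1 := by
    simp [List.getElem_append_right (Nat.le_refl pre.length)]
  simp [hget]

theorem skip_cons_pos (pre c : List Int) (x : Int) (hx : x ≠ -1) :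
    pySkip (pre ++ x :: c) pre.length = pre.length := by
  rw [pySkip]
  have hlt : pre.length < (pre ++ x :: c).length := by simp
  have hget : (pre ++ x :: c)[pre.length]'hlt = x := by
    simp [List.getElem_append_right (Nat.le_refl pre.length)]
  simp [hget, hx]

-- the loop invariant: with the prefix `pre` already final, folding vs over (pre ++ cur) fills cur
theorem loop_fill (cur : List Int) : ∀ (vs pre : List Int),
    (∀ v ∈ vs, v ≠ -1) → vs.length ≤ cur.countP (fun v => v ≠ -1) →
    (vs.foldl pyStep (pre.length, pre ++ cur)).2 = pre ++ fillSorted cur vs := by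
  induction cur with
  | nil =>
    intro vs pre _ hlen
    have : vs = [] := List.eq_nil_of_length_eq_zero (Nat.le_zero.mp (by simpa using hlen))
    subst this; simp [fillSorted]
  | cons x c ih =>
    intro vs pre hne hlen
    cases vs with
    | nil => simp [fillSorted_nil_vals]
    | cons v vt =>
      have hv : v ≠ -1 := hne v (by simp)
      have hvt : ∀ u ∈ vt, u ≠ -1 := fun u hu => hne u (by simp [hu])
      by_cases hx : x = -1
      · subst hx
        have hstep : pyStep (pre.length, pre ++ (-1 : Int) :: c) v
            = pyStep ((pre ++ [(-1 : Int)]).length, (pre ++ [(-1 : Int)]) ++ c) v := by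
          simp only [pyStep, skip_cons_neg pre c]
          simp [hv]
        have h2 : List.countP (fun v => decide (v ≠ -1)) ((-1 : Int) :: c)
            = List.countP (fun v => decide (v ≠ -1)) c := by
          rw [List.countP_cons]; simp
        have hcnt : (v :: vt).length ≤ c.countP (fun v => v ≠ -1) := by
          simp only [List.length_cons] at hlen ⊢; omega
        calc ((v :: vt).foldl pyStep (pre.length, pre ++ (-1 : Int) :: c)).2
            = (vt.foldl pyStep (pyStep ((pre ++ [(-1 : Int)]).length, (pre ++ [(-1 : Int)]) ++ c) v)).2 := by
              rw [List.foldl_cons, hstep]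
          _ = ((v :: vt).foldl pyStep ((pre ++ [(-1 : Int)]).length, (pre ++ [(-1 : Int)]) ++ c)).2 := by
              rw [List.foldl_cons]
          _ = (pre ++ [(-1 : Int)]) ++ fillSorted c (v :: vt) := ih (v :: vt) (pre ++ [(-1 : Int)]) hne hcnt
          _ = pre ++ fillSorted ((-1 : Int) :: c) (v :: vt) := by
              simp [fillSorted]
      · have hstep : pyStep (pre.length, pre ++ x :: c) v
            = ((pre ++ [v]).length, (pre ++ [v]) ++ c) := by
          simp only [pyStep, skip_cons_pos pre c x hx, if_pos hv]
          have hset : (pre ++ x :: c).set pre.length v = pre ++ v :: c := by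
            rw [List.set_append]; simp
          simp [hset]
        have h2 : List.countP (fun v => decide (v ≠ -1)) (x :: c)
            = List.countP (fun v => decide (v ≠ -1)) c + 1 := by
          rw [List.countP_cons]; simp [hx]
        have hcnt : vt.length ≤ c.countP (fun v => v ≠ -1) := by
          simp only [List.length_cons] at hlen; omega
        calc ((v :: vt).foldl pyStep (pre.length, pre ++ x :: c)).2
            = (vt.foldl pyStep ((pre ++ [v]).length, (pre ++ [v]) ++ c)).2 := by
              rw [List.foldl_cons, hstep]
          _ = (pre ++ [v]) ++ fillSorted c vt := ih vt (pre ++ [v]) hvt hcnt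
          _ = pre ++ fillSorted (x :: c) (v :: vt) := by
              simp [fillSorted, hx]

-- ===== VERDICT (by name: the statement is the Claim_ definition above) =====
theorem solution_spec : Claim_equal_solution := by
  intro a _
  show solution a = solution_alt a
  unfold solution solution_alt
  rw [foldl_pyStep_filter, filter_sorted, fillPool_eq_fillSorted]
  have hne : ∀ v ∈ PySem.List.sorted (a.filter (fun v => v ≠ -1)) (fun x => x) false, v ≠ -1 := by
    intro v hv
    rw [PySem.List.mem_sorted] at hv
    simpa using (List.mem_filter.mp hv).2
  have hlen : (PySem.List.sorted (a.filter (fun v => v ≠ -1)) (fun x => x) false).length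
      ≤ a.countP (fun v => v ≠ -1) := by
    rw [PySem.List.length_sorted]
    exact le_of_eq List.countP_eq_length_filter.symm
  have := loop_fill a _ [] hne hlen
  simpa using this
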